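-- pv_equiv track=rewrite | github.com/OpenHistoricalMap/ohm-deploy | images/tiler-cache/utils/varnish_purger.py | _prefixes_for_x_range
-- ===== SOURCE A (Python) =====
-- from typing import Iterable, List, Set
--
-- def _tile_to_prefix(z: int, x: int) -> str:
--     """Return a z/x_prefix truncated like the S3 cleaner does.
--
--     x_str <= 2 chars: keep as-is ; 3 chars: drop last ; 4+ chars: drop last 2.
--     """
--     x_str = str(x)
--     if len(x_str) <= 2:
--         return f"{z}/{x_str}"
--     if len(x_str) == 3:
--         return f"{z}/{x_str[:-1]}"
--     return f"{z}/{x_str[:-2]}"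
--
-- def _prefixes_for_x_range(z: int, x_lo: int, x_hi: int) -> Set[str]:
--     """Unique z/x_prefix strings for x in [x_lo, x_hi].
--
--     Walks x by jumping to the next x that would change the truncated prefix,
--     so the work scales with the number of prefixes, not the width of the range.
--     """
--     out: Set[str] = set()
--     x = x_lo
--     while x <= x_hi:
--         out.add(_tile_to_prefix(z, x))
--         s = str(x)
--         if len(s) <= 2:
--             x += 1
--         elif len(s) == 3:
--             x = (x // 10 + 1) * 10
--         else:
--             x = (x // 100 + 1) * 100
--     return out
-- ===== SOURCE B (Python) =====
-- def _tile_to_prefix(z: int, x: int) -> str: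
--     x_str = str(x)
--     if len(x_str) <= 2:
--         return f"{z}/{x_str}"
--     if len(x_str) == 3:
--         return f"{z}/{x_str[:-1]}"
--     return f"{z}/{x_str[:-2]}"
--
-- def _prefixes_for_x_range(z: int, x_lo: int, x_hi: int):
--     """Exhaustive scan: one prefix per x, deduplicated by the set itself."""
--     return {_tile_to_prefix(z, x) for x in range(x_lo, x_hi + 1)}
-- ===== Notes on version B (the rewrite author's own statement) =====
-- stated objective: simpler
-- what changed: Replaced A's boundary-jumping while loop (jump to the next x that changes the truncated prefix, three digit-count stepping branches) by a one-line exhaustive set comprehension over every x in [x_lo, x_hi] reusing the same _tile_to_prefix helper.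
-- outside the precondition, e.g. on _prefixes_for_x_range(3, -400, -399): A returns {'3/-4'}, B returns {'3/-4', '3/-3'}
import Mathlib
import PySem

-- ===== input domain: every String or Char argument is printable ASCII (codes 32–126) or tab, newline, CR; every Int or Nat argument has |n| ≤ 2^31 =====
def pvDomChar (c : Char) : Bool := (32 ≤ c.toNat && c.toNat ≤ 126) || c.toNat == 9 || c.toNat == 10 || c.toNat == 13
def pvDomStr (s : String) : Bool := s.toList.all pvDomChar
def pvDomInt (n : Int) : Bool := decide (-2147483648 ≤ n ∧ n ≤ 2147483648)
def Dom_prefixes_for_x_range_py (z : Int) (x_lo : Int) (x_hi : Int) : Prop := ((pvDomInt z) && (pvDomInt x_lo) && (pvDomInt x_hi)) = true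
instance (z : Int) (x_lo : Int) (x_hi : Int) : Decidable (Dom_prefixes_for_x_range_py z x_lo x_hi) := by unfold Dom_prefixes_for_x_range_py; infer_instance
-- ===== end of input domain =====

-- B replaces A's boundary-jumping while loop by an exhaustive set comprehension over the
-- whole x range (simpler, not faster); both reuse the same _tile_to_prefix helper.

-- ===== PORT A =====
-- shared helper: Python _tile_to_prefix (f"{z}/{...}" built as a char list)
def pvTilePrefix (z : Int) (x : Int) : String :=
  let x_str := PySem.Int.toChars x
  if x_str.length ≤ 2 then String.ofList (PySem.Int.toChars z ++ '/' :: x_str)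
  else if x_str.length = 3 then
    String.ofList (PySem.Int.toChars z ++ '/' :: PySem.List.slice x_str none (some (-1)))
  else
    String.ofList (PySem.Int.toChars z ++ '/' :: PySem.List.slice x_str none (some (-2)))

-- termination facts for A's jumps (cited by loopA's decreasing_by)
theorem pvJump10_gt (x : Int) : x < (PySem.Int.floordiv x 10 + 1) * 10 := by
  have h := PySem.Int.floordiv_mul_add_mod x 10
  have h1 := PySem.Int.mod_nonneg x (b := 10) (by norm_num)
  have h2 := PySem.Int.mod_lt x (b := 10) (by norm_num)
  omega

theorem pvJump100_gt (x : Int) : x < (PySem.Int.floordiv x 100 + 1) * 100 := by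
  have h := PySem.Int.floordiv_mul_add_mod x 100
  have h1 := PySem.Int.mod_nonneg x (b := 100) (by norm_num)
  have h2 := PySem.Int.mod_lt x (b := 100) (by norm_num)
  omega

-- the while loop of A: add the prefix of x, then jump to the next prefix boundary
def pvLoopA (z : Int) (x_hi : Int) (x : Int) (out : List String) : List String :=
  if _h : x ≤ x_hi then
    let out' := PySem.Set.add out (pvTilePrefix z x)
    let s := PySem.Int.toChars x
    if s.length ≤ 2 then pvLoopA z x_hi (x + 1) out'
    else if s.length = 3 then pvLoopA z x_hi ((PySem.Int.floordiv x 10 + 1) * 10) out'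
    else pvLoopA z x_hi ((PySem.Int.floordiv x 100 + 1) * 100) out'
  else out
termination_by (x_hi + 1 - x).toNat
decreasing_by
  · omega
  · have := pvJump10_gt x; omega
  · have := pvJump100_gt x; omega

def prefixes_for_x_range_py (z : Int) (x_lo : Int) (x_hi : Int) : List String :=
  pvLoopA z x_hi x_lo PySem.Set.empty

-- ===== PORT B =====
-- Source B: {_tile_to_prefix(z, x) for x in range(x_lo, x_hi + 1)}
def prefixes_for_x_range_py_alt (z : Int) (x_lo : Int) (x_hi : Int) : List String :=
  PySem.Set.ofList ((PySem.List.pyRange x_lo (x_hi + 1) 1).map (fun x => pvTilePrefix z x))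

-- ===== PRECONDITION & SPEC =====
-- Pre_ excludes nonempty ranges starting at x_lo ≤ -10, outside the natural tile domain
-- (tile x-coordinates are nonnegative): there A's jump-to-next-boundary arithmetic can skip
-- prefixes that the exhaustive scan keeps (e.g. x in [-400, -399]).
def Pre_prefixes_for_x_range_py (z : Int) (x_lo : Int) (x_hi : Int) : Prop := -9 ≤ x_lo ∨ x_hi < x_lo
instance (z : Int) (x_lo : Int) (x_hi : Int) : Decidable (Pre_prefixes_for_x_range_py z x_lo x_hi) := by unfold Pre_prefixes_for_x_range_py; infer_instance

def pvWitness_prefixes_for_x_range_py : Int × Int × Int := (3, 95, 312)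

def Spec_prefixes_for_x_range_py (z : Int) (x_lo : Int) (x_hi : Int) (out : List String) : Prop := out = prefixes_for_x_range_py_alt z x_lo x_hi
instance (z : Int) (x_lo : Int) (x_hi : Int) (out : List String) : Decidable (Spec_prefixes_for_x_range_py z x_lo x_hi out) := by unfold Spec_prefixes_for_x_range_py; infer_instance

-- ===== CLAIM (what is proved, stated in full; the proofs are below) =====
def Claim_equal_prefixes_for_x_range_py : Prop := ∀ (z : Int) (x_lo : Int) (x_hi : Int), Dom_prefixes_for_x_range_py z x_lo x_hi → Pre_prefixes_for_x_range_py z x_lo x_hi → Spec_prefixes_for_x_range_py z x_lo x_hi (prefixes_for_x_range_py z x_lo x_hi)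

-- ===== LEMMAS AND PROOFS =====

-- decimal-string structure of Nat.toDigits (= str(n) for n ≥ 0)
theorem pvTdcAcc (f : Nat) : ∀ (n : Nat) (ds : List Char),
    Nat.toDigitsCore 10 f n ds = Nat.toDigitsCore 10 f n [] ++ ds := by
  induction f with
  | zero => intro n ds; simp [Nat.toDigitsCore]
  | succ f ih =>
    intro n ds
    simp only [Nat.toDigitsCore]
    by_cases h : n / 10 = 0
    · simp [h]
    · rw [if_neg h, if_neg h, ih (n / 10) ((n % 10).digitChar :: ds),
        ih (n / 10) [(n % 10).digitChar], List.append_assoc]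
      rfl

theorem pvTdcFuel : ∀ (n f g : Nat), n < f → n < g →
    Nat.toDigitsCore 10 f n [] = Nat.toDigitsCore 10 g n [] := by
  intro n
  induction n using Nat.strong_induction_on with
  | _ n ih =>
    intro f g hf hg
    match f, g with
    | f + 1, g + 1 =>
      simp only [Nat.toDigitsCore]
      by_cases h : n / 10 = 0
      · simp [h]
      · have hn : 10 ≤ n := by
          by_contra hn
          exact h (Nat.div_eq_of_lt (by omega))
        have hlt : n / 10 < n := Nat.div_lt_self (by omega) (by omega)
        rw [if_neg h, if_neg h, pvTdcAcc, pvTdcAcc g]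
        rw [ih (n / 10) hlt (f := f) (g := g) (by omega) (by omega)]

theorem pvShift (n : Nat) (h : 10 ≤ n) :
    Nat.toDigits 10 n = Nat.toDigits 10 (n / 10) ++ [Nat.digitChar (n % 10)] := by
  have h0 : n / 10 ≠ 0 := by
    intro h0
    have := Nat.lt_of_div_eq_zero (by omega) h0
    omega
  unfold Nat.toDigits
  conv_lhs => simp only [Nat.toDigitsCore]
  rw [if_neg h0, pvTdcAcc]
  rw [pvTdcFuel (n / 10) n (n / 10 + 1) (Nat.div_lt_self (by omega) (by omega)) (by omega)]

theorem pvSmall (n : Nat) (h : n < 10) : Nat.toDigits 10 n = [Nat.digitChar n] := by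
  simp [Nat.toDigits, Nat.toDigitsCore, Nat.div_eq_of_lt h, Nat.mod_eq_of_lt h]

-- digit counts
theorem pvLen1 (n : Nat) (h : n < 10) : (Nat.toDigits 10 n).length = 1 := by
  rw [pvSmall n h]; rfl

theorem pvLen2 (n : Nat) (h1 : 10 ≤ n) (h2 : n < 100) : (Nat.toDigits 10 n).length = 2 := by
  rw [pvShift n h1]
  simp [pvLen1 (n / 10) (by omega)]

theorem pvLen3 (n : Nat) (h1 : 100 ≤ n) (h2 : n < 1000) : (Nat.toDigits 10 n).length = 3 := by
  rw [pvShift n (by omega)]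
  simp [pvLen2 (n / 10) (by omega) (by omega)]

theorem pvLenGe2 (n : Nat) (h : 10 ≤ n) : 2 ≤ (Nat.toDigits 10 n).length := by
  rw [pvShift n h]
  have : (Nat.toDigits 10 (n / 10)).length ≠ 0 := by
    intro h0
    have := List.eq_nil_of_length_eq_zero h0
    rcases Nat.lt_or_ge (n / 10) 10 with hc | hc
    · rw [pvSmall _ hc] at this; simp at this
    · rw [pvShift _ hc] at this; simp at this
  simp; omega

theorem pvLenGe4 (n : Nat) (h : 1000 ≤ n) : 4 ≤ (Nat.toDigits 10 n).length := by
  rw [pvShift n (by omega), pvShift (n / 10) (by omega)]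
  have := pvLenGe2 (n / 10 / 10) (by omega)
  simp; omega

theorem pvToCharsNonneg (x : Int) (h : 0 ≤ x) :
    PySem.Int.toChars x = Nat.toDigits 10 x.toNat := by
  simp only [PySem.Int.toChars]
  rw [if_neg (by omega)]

theorem pvToCharsNeg (x : Int) (h : x < 0) :
    PySem.Int.toChars x = '-' :: Nat.toDigits 10 x.natAbs := by
  simp only [PySem.Int.toChars]
  rw [if_pos h]

-- tile shape on the 3-digit and 4+-digit magnitude bands (x ≥ 0)
theorem pvTileMid (z x : Int) (h1 : 100 ≤ x) (h2 : x < 1000) :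
    pvTilePrefix z x = String.ofList (PySem.Int.toChars z ++ '/' :: Nat.toDigits 10 (x.toNat / 10)) := by
  have hl : (PySem.Int.toChars x).length = 3 := by
    rw [pvToCharsNonneg x (by omega)]
    exact pvLen3 _ (by omega) (by omega)
  simp only [pvTilePrefix]
  rw [if_neg (by omega), if_pos hl, pvToCharsNonneg x (by omega),
    PySem.List.slice_to_neg_one, pvShift x.toNat (by omega), List.dropLast_concat]

theorem pvTileBig (z x : Int) (h1 : 1000 ≤ x) :
    pvTilePrefix z x = String.ofList (PySem.Int.toChars z ++ '/' :: Nat.toDigits 10 (x.toNat / 100)) := by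
  have hl : 4 ≤ (PySem.Int.toChars x).length := by
    rw [pvToCharsNonneg x (by omega)]
    exact pvLenGe4 _ (by omega)
  simp only [pvTilePrefix]
  rw [if_neg (by omega), if_neg (by omega), pvToCharsNonneg x (by omega),
    PySem.List.slice_to_neg_ofNat _ 2 (by norm_num)]
  rw [pvShift x.toNat (by omega), pvShift (x.toNat / 10) (by omega), Nat.div_div_eq_div_mul]
  norm_num

-- prefix constancy on A's jump blocks
theorem pvConstMid (z x y : Int) (h1 : 100 ≤ x) (h2 : x < 1000) (hxy : x ≤ y)
    (hy : y < (PySem.Int.floordiv x 10 + 1) * 10) : pvTilePrefix z y = pvTilePrefix z x := by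
  rw [PySem.Int.floordiv_eq_ediv_of_pos (by norm_num)] at hy
  have hy2 : y < 1000 := by omega
  rw [pvTileMid z x h1 h2, pvTileMid z y (by omega) hy2]
  have : y.toNat / 10 = x.toNat / 10 := by omega
  rw [this]

theorem pvConstBig (z x y : Int) (h1 : 1000 ≤ x) (hxy : x ≤ y)
    (hy : y < (PySem.Int.floordiv x 100 + 1) * 100) : pvTilePrefix z y = pvTilePrefix z x := by
  rw [PySem.Int.floordiv_eq_ediv_of_pos (by norm_num)] at hy
  rw [pvTileBig z x h1, pvTileBig z y (by omega)]
  have : y.toNat / 100 = x.toNat / 100 := by omega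
  rw [this]

-- folding Set.add with a constant value is one add
theorem pvFoldConst (z : Int) (p : String) : ∀ (l : List Int) (out : List String),
    (∀ y ∈ l, pvTilePrefix z y = p) →
    l.foldl (fun o y => PySem.Set.add o (pvTilePrefix z y)) (PySem.Set.add out p)
      = PySem.Set.add out p := by
  intro l
  induction l with
  | nil => intro out _; rfl
  | cons a l ih =>
    intro out h
    have ha : pvTilePrefix z a = p := h a (by simp)
    simp only [List.foldl_cons, ha]
    rw [PySem.Set.add_of_mem ((PySem.Set.mem_add _ _ _).mpr (Or.inr rfl))]
    exact ih _ (fun y hy => h y (by simp [hy]))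

theorem pvBlockFold (z x e : Int) (out : List String) (hxe : x < e)
    (hconst : ∀ y, x ≤ y → y < e → pvTilePrefix z y = pvTilePrefix z x) :
    (PySem.List.pyRange x e 1).foldl (fun o y => PySem.Set.add o (pvTilePrefix z y)) out
      = PySem.Set.add out (pvTilePrefix z x) := by
  rw [PySem.List.pyRange_one_cons hxe]
  simp only [List.foldl_cons]
  exact pvFoldConst z (pvTilePrefix z x) _ _
    (fun y hy => by
      have := PySem.List.mem_pyRange_one.mp hy
      exact hconst y (by omega) (by omega))

-- one A-step absorbs the whole block [x, nx) of the scan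
theorem pvRangeStep (z x nx e : Int) (out : List String) (hxn : x < nx) (hxe : x < e)
    (hconst : ∀ y, x ≤ y → y < nx → pvTilePrefix z y = pvTilePrefix z x) :
    (PySem.List.pyRange x e 1).foldl (fun o y => PySem.Set.add o (pvTilePrefix z y)) out
      = (PySem.List.pyRange nx e 1).foldl (fun o y => PySem.Set.add o (pvTilePrefix z y))
          (PySem.Set.add out (pvTilePrefix z x)) := by
  by_cases hne : nx ≤ e
  · rw [PySem.List.pyRange_one_append x nx e (by omega) hne, List.foldl_append,
      pvBlockFold z x nx out hxn hconst]
  · rw [PySem.List.pyRange_one_eq_nil (by omega : e ≤ nx)]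
    simp only [List.foldl_nil]
    exact pvBlockFold z x e out hxe (fun y hy1 hy2 => hconst y hy1 (by omega))

-- main loop invariant: for x ≥ 0, A's jump loop equals the exhaustive scan
theorem pvLoopAEq (z hi : Int) : ∀ (n : Nat) (x : Int) (out : List String),
    (hi + 1 - x).toNat ≤ n → -9 ≤ x →
    pvLoopA z hi x out
      = (PySem.List.pyRange x (hi + 1) 1).foldl
          (fun o y => PySem.Set.add o (pvTilePrefix z y)) out := by
  intro n
  induction n with
  | zero =>
    intro x out hn _
    rw [pvLoopA, dif_neg (by omega : ¬ x ≤ hi), PySem.List.pyRange_one_eq_nil (by omega)]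
    rfl
  | succ n ih =>
    intro x out hn hx0
    by_cases hle : x ≤ hi
    · rw [pvLoopA, dif_pos hle]
      rcases Nat.lt_or_ge x.toNat 100 with hm | hm
      · -- x in [-9, 99]: one or two characters, step to x + 1
        have hl : (PySem.Int.toChars x).length ≤ 2 := by
          rcases lt_or_ge x 0 with hneg | hx0
          · rw [pvToCharsNeg x hneg, List.length_cons, pvLen1 _ (by omega)]
          · rw [pvToCharsNonneg x hx0]
            rcases Nat.lt_or_ge x.toNat 10 with hc | hc
            · rw [pvLen1 _ hc]; omega
            · rw [pvLen2 _ hc hm]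
        simp only [if_pos hl]
        rw [ih (x + 1) _ (by omega) (by omega),
          pvRangeStep z x (x + 1) (hi + 1) out (by omega) (by omega)
            (fun y h1 h2 => congrArg (pvTilePrefix z) (by omega : y = x))]
      · rcases Nat.lt_or_ge x.toNat 1000 with hm2 | hm2
        · -- 3-digit x: jump to the next multiple of 10
          have hl : (PySem.Int.toChars x).length = 3 := by
            rw [pvToCharsNonneg x (by omega)]; exact pvLen3 _ hm (by omega)
          simp only [if_neg (by omega : ¬ (PySem.Int.toChars x).length ≤ 2), if_pos hl]
          have hgt := pvJump10_gt x
          rw [ih _ _ (by omega) (by omega),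
            pvRangeStep z x _ (hi + 1) out hgt (by omega)
              (fun y h1 h2 => pvConstMid z x y (by omega) (by omega) h1 h2)]
        · -- 4+-digit x: jump to the next multiple of 100
          have hl : 4 ≤ (PySem.Int.toChars x).length := by
            rw [pvToCharsNonneg x (by omega)]; exact pvLenGe4 _ hm2
          simp only [if_neg (by omega : ¬ (PySem.Int.toChars x).length ≤ 2),
            if_neg (by omega : ¬ (PySem.Int.toChars x).length = 3)]
          have hgt := pvJump100_gt x
          rw [ih _ _ (by omega) (by omega),
            pvRangeStep z x _ (hi + 1) out hgt (by omega)
              (fun y h1 h2 => pvConstBig z x y (by omega) h1 h2)]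
    · rw [pvLoopA, dif_neg hle, PySem.List.pyRange_one_eq_nil (by omega)]
      rfl

-- ===== VERDICT (by name: the statement is the Claim_ definition above) =====
theorem prefixes_for_x_range_py_spec : Claim_equal_prefixes_for_x_range_py := by
  intro z x_lo x_hi _ hpre
  unfold Spec_prefixes_for_x_range_py prefixes_for_x_range_py prefixes_for_x_range_py_alt
  rcases lt_or_ge x_hi x_lo with hempty | hord
  · rw [pvLoopA, dif_neg (by omega), PySem.List.pyRange_one_eq_nil (by omega)]
    rfl
  · have hlo : -9 ≤ x_lo := by
      unfold Pre_prefixes_for_x_range_py at hpre; omega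
    rw [pvLoopAEq z x_hi (x_hi + 1 - x_lo).toNat x_lo PySem.Set.empty le_rfl hlo]
    rw [← PySem.Set.update_nil_left, PySem.Set.update_map_eq_foldl_add]
    rfl
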